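-- pv_equiv track=rewrite | github.com/dosht/hippo | scripts/extract_v2.py | latest_per_session
-- ===== SOURCE A (Python) =====
-- def latest_per_session(rows: list[dict]) -> dict[str, dict]:
--     """Merge rows by session_id in order; later fields override earlier.
--
--     This preserves immutable fields (bronze_path, project_id, ...) written
--     by ingest while letting later status-update rows mutate status/error/etc.
--     """
--     out: dict[str, dict] = {}
--     for r in rows:
--         sid = r.get("session_id")
--         if not sid:
--             continue
--         if sid in out:
--             out[sid].update(r)
--         else:
--             out[sid] = dict(r)
--     return out
-- ===== SOURCE B (Python) =====
-- def latest_per_session(rows: list[dict]) -> dict[str, dict]: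
--     """Two-pass version: first group rows by session_id (insertion order,
--     skipping falsy ids), then reduce each group into one merged dict."""
--     groups: dict[str, list] = {}
--     for r in rows:
--         sid = r.get("session_id")
--         if not sid:
--             continue
--         groups.setdefault(sid, []).append(r)
--     out: dict[str, dict] = {}
--     for sid, rs in groups.items():
--         merged = dict(rs[0])
--         for r in rs[1:]:
--             merged.update(r)
--         out[sid] = merged
--     return out
-- ===== Notes on version B (the rewrite author's own statement) =====
-- stated objective: alternative
-- what changed: Replaces A's single accumulate-as-you-go loop (merge each row into the output dict as it arrives) with a build-an-index-then-reduce shape: one pass grouping rows into session_id -> list of rows, then a second pass folding each group into its merged dict.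
import Mathlib
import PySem

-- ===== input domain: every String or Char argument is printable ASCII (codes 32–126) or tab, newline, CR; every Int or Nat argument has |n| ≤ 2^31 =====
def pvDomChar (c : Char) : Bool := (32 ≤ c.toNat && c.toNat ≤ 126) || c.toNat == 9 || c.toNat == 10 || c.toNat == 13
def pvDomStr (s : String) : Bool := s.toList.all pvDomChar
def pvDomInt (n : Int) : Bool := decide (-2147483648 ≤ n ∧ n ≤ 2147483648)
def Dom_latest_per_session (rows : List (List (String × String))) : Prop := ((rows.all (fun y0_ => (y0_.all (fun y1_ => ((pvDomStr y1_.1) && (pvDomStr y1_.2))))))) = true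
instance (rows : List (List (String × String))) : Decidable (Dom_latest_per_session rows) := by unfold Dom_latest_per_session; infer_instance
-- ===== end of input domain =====

-- B replaces A's accumulate-as-you-go loop by a group-then-reduce two-pass shape (alternative decomposition, same cost).

-- ===== PORT A =====
-- one iteration of A's loop body
def lpsStepA (out : PySem.Dict String (PySem.Dict String String)) (r : List (String × String)) :
    PySem.Dict String (PySem.Dict String String) :=
  match (PySem.Dict.ofList r).get? "session_id" with
  | none => out
  | some sid =>
    if sid = "" then out
    else if out.contains sid then out.insert sid ((out.getD sid PySem.Dict.empty).update r)
    else out.insert sid (PySem.Dict.ofList r)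

def latest_per_session (rows : List (List (String × String))) : List (String × List (String × String)) :=
  ((rows.foldl lpsStepA PySem.Dict.empty).items).map (fun p => (p.1, p.2.items))

-- ===== PORT B =====
-- first pass: group rows by session id (groups.setdefault(sid, []).append(r))
def lpsGroupStep (g : PySem.Dict String (List (List (String × String)))) (r : List (String × String)) :
    PySem.Dict String (List (List (String × String))) :=
  match (PySem.Dict.ofList r).get? "session_id" with
  | none => g
  | some sid =>
    if sid = "" then g else g.modify sid [] (fun rs => rs ++ [r])

-- second pass body: merged = dict(rs[0]); for r in rs[1:]: merged.update(r)
def lpsMerge (rs : List (List (String × String))) : PySem.Dict String String :=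
  match rs with
  | [] => PySem.Dict.empty
  | r0 :: rest => rest.foldl (fun d r => d.update r) (PySem.Dict.ofList r0)

def latest_per_session_alt (rows : List (List (String × String))) : List (String × List (String × String)) :=
  ((rows.foldl lpsGroupStep PySem.Dict.empty).items).map (fun p => (p.1, (lpsMerge p.2).items))

-- ===== PRECONDITION & SPEC =====
def Spec_latest_per_session (rows : List (List (String × String))) (out : List (String × List (String × String))) : Prop := out = latest_per_session_alt rows
instance (rows : List (List (String × String))) (out : List (String × List (String × String))) : Decidable (Spec_latest_per_session rows out) := by unfold Spec_latest_per_session; infer_instance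

-- ===== CLAIM (what is proved, stated in full; the proofs are below) =====
def Claim_equal_latest_per_session : Prop := ∀ (rows : List (List (String × String))), Dom_latest_per_session rows → Spec_latest_per_session rows (latest_per_session rows)

-- ===== LEMMAS AND PROOFS =====

-- the simulation map: a grouping dict as seen through A's merged output dict
def lpsPhi (g : PySem.Dict String (List (List (String × String)))) :
    PySem.Dict String (PySem.Dict String String) :=
  PySem.Dict.mk (g.items.map (fun p => (p.1, lpsMerge p.2)))

theorem lpsPhi_items (g : PySem.Dict String (List (List (String × String)))) :
    (lpsPhi g).items = g.items.map (fun p => (p.1, lpsMerge p.2)) := rfl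

theorem lpsPhi_keys (g : PySem.Dict String (List (List (String × String)))) :
    (lpsPhi g).keys = g.keys := by
  simp [PySem.Dict.keys, lpsPhi_items]

theorem lpsMerge_append (rs : List (List (String × String))) (r : List (String × String))
    (h : rs ≠ []) : lpsMerge (rs ++ [r]) = (lpsMerge rs).update r := by
  cases rs with
  | nil => exact absurd rfl h
  | cons r0 rest => simp [lpsMerge, List.foldl_append]

theorem lpsStep_comm (g : PySem.Dict String (List (List (String × String))))
    (r : List (String × String))
    (hnd : g.keys.Nodup) (hne : ∀ p ∈ g.items, p.2 ≠ []) :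
    lpsStepA (lpsPhi g) r = lpsPhi (lpsGroupStep g r) := by
  unfold lpsStepA lpsGroupStep
  cases hsid : (PySem.Dict.ofList r).get? "session_id" with
  | none => rfl
  | some sid =>
    by_cases hz : sid = ""
    · simp [hz]
    · simp only [hz, if_false]
      have hcont : (lpsPhi g).contains sid = g.contains sid := by
        rw [PySem.Dict.contains_eq_decide_mem_keys, PySem.Dict.contains_eq_decide_mem_keys,
          lpsPhi_keys]
      have hmod : g.modify sid [] (fun rs => rs ++ [r])
          = g.insert sid (g.getD sid [] ++ [r]) := rfl
      by_cases hc : g.contains sid = true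
      · -- sid already present
        obtain ⟨rs, hmem⟩ : ∃ rs, (sid, rs) ∈ g.items := by
          have : sid ∈ g.keys := (PySem.Dict.contains_iff_mem_keys g sid).mp hc
          simp only [PySem.Dict.keys, List.mem_map] at this
          obtain ⟨⟨pk, pv⟩, hp, rfl⟩ := this
          exact ⟨pv, hp⟩
        have hgD : g.getD sid [] = rs := PySem.Dict.getD_of_mem_items g hmem hnd []
        have hrs : rs ≠ [] := hne _ hmem
        have hΦmem : (sid, lpsMerge rs) ∈ (lpsPhi g).items := by
          rw [lpsPhi_items]
          exact List.mem_map.mpr ⟨(sid, rs), hmem, rfl⟩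
        have hΦnd : (lpsPhi g).keys.Nodup := by rw [lpsPhi_keys]; exact hnd
        have hΦD : (lpsPhi g).getD sid PySem.Dict.empty = lpsMerge rs :=
          PySem.Dict.getD_of_mem_items _ hΦmem hΦnd _
        simp only [hcont, hc, if_true, hmod, hΦD]
        apply PySem.Dict.ext
        rw [PySem.Dict.items_insert_of_contains _ _ (hcont.trans hc)]
        simp only [lpsPhi_items]
        rw [PySem.Dict.items_insert_of_contains _ _ hc, List.map_map, List.map_map]
        apply List.map_congr_left
        rintro ⟨pk, pv⟩ hp
        by_cases hp1 : pk = sid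
        · subst hp1
          have h2 : g.getD pk [] = pv := PySem.Dict.getD_of_mem_items g hp hnd []
          rw [hgD] at h2
          subst h2
          simp [Function.comp, hgD, lpsMerge_append rs r hrs]
        · simp [Function.comp, hp1]
      · -- sid fresh
        have hc' : g.contains sid = false := by simpa using hc
        have hΦc : (lpsPhi g).contains sid = false := by rw [hcont]; exact hc'
        have hgD : g.getD sid [] = [] := PySem.Dict.getD_of_not_contains g [] hc'
        simp only [hcont, hc', Bool.false_eq_true, if_false, hmod, hgD, List.nil_append]
        apply PySem.Dict.ext
        rw [PySem.Dict.items_insert_of_not_contains _ _ hΦc]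
        simp only [lpsPhi_items]
        rw [PySem.Dict.items_insert_of_not_contains _ _ hc', List.map_append]
        simp [lpsMerge]

theorem lpsGroupStep_nodup (g : PySem.Dict String (List (List (String × String))))
    (r : List (String × String)) (hnd : g.keys.Nodup) :
    (lpsGroupStep g r).keys.Nodup := by
  unfold lpsGroupStep
  cases (PySem.Dict.ofList r).get? "session_id" with
  | none => exact hnd
  | some sid =>
    by_cases hz : sid = ""
    · simpa [hz]
    · simpa [hz] using PySem.Dict.nodup_keys_insert (d := g) (k := sid) (v := g.getD sid [] ++ [r]) hnd

theorem lpsGroupStep_nonempty (g : PySem.Dict String (List (List (String × String))))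
    (r : List (String × String)) (hne : ∀ p ∈ g.items, p.2 ≠ []) :
    ∀ p ∈ (lpsGroupStep g r).items, p.2 ≠ [] := by
  unfold lpsGroupStep
  cases (PySem.Dict.ofList r).get? "session_id" with
  | none => exact hne
  | some sid =>
    by_cases hz : sid = ""
    · simpa [hz] using hne
    · simp only [hz, if_false]
      intro p hp
      rcases (PySem.Dict.mem_items_insert g sid (g.getD sid [] ++ [r]) p).mp hp with h | ⟨h, _⟩
      · subst h; simp
      · exact hne _ h

theorem lps_loop (rows : List (List (String × String))) :
    ∀ g, g.keys.Nodup → (∀ p ∈ g.items, p.2 ≠ []) →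
      rows.foldl lpsStepA (lpsPhi g) = lpsPhi (rows.foldl lpsGroupStep g) := by
  induction rows with
  | nil => intro g _ _; rfl
  | cons r rest ih =>
    intro g hnd hne
    simp only [List.foldl_cons]
    rw [lpsStep_comm g r hnd hne]
    exact ih _ (lpsGroupStep_nodup g r hnd) (lpsGroupStep_nonempty g r hne)

-- ===== VERDICT (by name: the statement is the Claim_ definition above) =====
theorem latest_per_session_spec : Claim_equal_latest_per_session := by
  intro rows _
  unfold Spec_latest_per_session latest_per_session latest_per_session_alt
  have h0 : (PySem.Dict.empty : PySem.Dict String (PySem.Dict String String)) = lpsPhi PySem.Dict.empty := rfl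
  rw [h0, lps_loop rows PySem.Dict.empty PySem.Dict.nodup_keys_empty
    (fun p hp => by simp [PySem.Dict.empty] at hp), lpsPhi_items, List.map_map]
  simp [Function.comp]
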